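-- pv_equiv track=rewrite | github.com/katehewett/LKH | OBS_processing/OOI/coastal_endurance/velocity/step1_organize_ooi/old/CE06ISSM_organize_ADCP.py | find_duplicate_indices
-- ===== SOURCE A (Python) =====
-- def find_duplicate_indices(list_):
--     seen = {}
--     duplicates = []
--     for i, item in enumerate(list_):
--         if item in seen:
--             duplicates.append(i)
--         else:
--             seen[item] = True
--     return duplicates
-- ===== SOURCE B (Python) =====
-- def find_duplicate_indices(list_):
--     first_seen = {}
--     for i, x in enumerate(list_):
--         first_seen.setdefault(x, i)
--     return [i for i, x in enumerate(list_) if first_seen[x] != i]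
-- ===== Notes on version B (the rewrite author's own statement) =====
-- stated objective: alternative
-- what changed: Replaces A's single stateful scan (a growing 'seen' dict deciding duplicates as it goes) with two passes: first build a table of each value's first-occurrence index, then a stateless comprehension keeping every index that is not its value's first occurrence.
import Mathlib
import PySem

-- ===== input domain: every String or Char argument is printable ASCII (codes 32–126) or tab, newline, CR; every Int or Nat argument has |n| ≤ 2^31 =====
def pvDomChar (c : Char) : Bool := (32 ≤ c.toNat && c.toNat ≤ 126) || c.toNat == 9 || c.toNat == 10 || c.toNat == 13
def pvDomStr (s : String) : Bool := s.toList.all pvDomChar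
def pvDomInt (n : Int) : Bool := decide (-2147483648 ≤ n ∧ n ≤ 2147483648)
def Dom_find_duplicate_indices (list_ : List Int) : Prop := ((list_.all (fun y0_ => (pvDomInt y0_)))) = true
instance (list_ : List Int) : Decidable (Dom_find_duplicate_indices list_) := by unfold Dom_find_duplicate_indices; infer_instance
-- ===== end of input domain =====

-- B replaces A's single stateful scan (a growing 'seen' dict deciding as it goes) with two passes:
-- build a first-occurrence index table, then a stateless filter keeping indices that are not first occurrences.

-- ===== PORT A =====
-- seen = {}; duplicates = []; for i, item in enumerate(list_): if item in seen: duplicates.append(i)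
-- else: seen[item] = True; return duplicates
def find_duplicate_indices (list_ : List Int) : List Int :=
  ((PySem.List.enumerate list_ 0).foldl
    (fun (st : PySem.Dict Int Bool × List Int) p =>
      if st.1.contains p.2 then (st.1, st.2 ++ [p.1])
      else (st.1.insert p.2 true, st.2))
    (PySem.Dict.empty, [])).2

-- ===== PORT B =====
-- first_seen = {}; for i, x in enumerate(list_): first_seen.setdefault(x, i)
-- return [i for i, x in enumerate(list_) if first_seen[x] != i]
-- (first_seen[x] can never raise KeyError here since every x of the comprehension was inserted by the
--  first loop; 'get? ≠ some i' is exact on every reachable lookup.)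
def find_duplicate_indices_alt (list_ : List Int) : List Int :=
  let first_seen := (PySem.List.enumerate list_ 0).foldl
    (fun (d : PySem.Dict Int Int) p => d.setdefault p.2 p.1) PySem.Dict.empty
  (PySem.List.enumerate list_ 0).filterMap
    (fun p => if first_seen.get? p.2 ≠ some p.1 then some p.1 else none)

-- ===== PRECONDITION & SPEC =====
def Spec_find_duplicate_indices (list_ : List Int) (out : List Int) : Prop := out = find_duplicate_indices_alt list_
instance (list_ : List Int) (out : List Int) : Decidable (Spec_find_duplicate_indices list_ out) := by unfold Spec_find_duplicate_indices; infer_instance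

-- ===== CLAIM (what is proved, stated in full; the proofs are below) =====
def Claim_equal_find_duplicate_indices : Prop := ∀ (list_ : List Int), Dom_find_duplicate_indices list_ → Spec_find_duplicate_indices list_ (find_duplicate_indices list_)

-- ===== LEMMAS AND PROOFS =====

-- common characterisation: indices (from k) of elements already occurring in the prefix `pre`
def dupAux (pre : List Int) (k : Int) : List Int → List Int
  | [] => []
  | x :: xs => (if x ∈ pre then [k] else []) ++ dupAux (pre ++ [x]) (k + 1) xs

theorem findA_loop (l : List Int) :
    ∀ (s : PySem.Dict Int Bool) (acc pre : List Int) (k : Int),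
    (∀ x : Int, s.contains x = true ↔ x ∈ pre) →
    ((PySem.List.enumerate l k).foldl
      (fun (st : PySem.Dict Int Bool × List Int) p =>
        if st.1.contains p.2 then (st.1, st.2 ++ [p.1])
        else (st.1.insert p.2 true, st.2)) (s, acc)).2 = acc ++ dupAux pre k l := by
  induction l with
  | nil => intro s acc pre k h; simp [PySem.List.enumerate_nil, dupAux]
  | cons x xs ih =>
    intro s acc pre k h
    rw [PySem.List.enumerate_cons, List.foldl_cons]
    by_cases hx : x ∈ pre
    · have hc : s.contains x = true := (h x).mpr hx
      simp only [hc, if_true]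
      rw [ih s (acc ++ [k]) (pre ++ [x]) (k + 1) ?_]
      · simp [dupAux, hx]
      · intro y; rw [h y]; simp only [List.mem_append, List.mem_singleton]
        constructor
        · exact Or.inl
        · rintro (hy | rfl); exact hy; exact hx
    · have hc : s.contains x = false := by
        cases hcc : s.contains x
        · rfl
        · exact absurd ((h x).mp hcc) hx
      simp only [hc, Bool.false_eq_true, if_false]
      rw [ih (s.insert x true) acc (pre ++ [x]) (k + 1) ?_]
      · simp [dupAux, hx]
      · intro y
        rw [PySem.Dict.contains_insert, Bool.or_eq_true, beq_iff_eq, h y]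
        simp only [List.mem_append, List.mem_singleton]
        tauto

theorem findB_loop (l : List Int) :
    ∀ (front : List Int),
    (PySem.List.enumerate l (front.length : Int)).filterMap
      (fun p => if p.2 ∈ PySem.List.slice (front ++ l) none (some p.1) then some p.1 else none)
    = dupAux front (front.length : Int) l := by
  induction l with
  | nil => intro front; simp [PySem.List.enumerate_nil, dupAux]
  | cons x xs ih =>
    intro front
    rw [PySem.List.enumerate_cons, List.filterMap_cons]
    have hslice : PySem.List.slice (front ++ x :: xs) none (some (front.length : Int)) = front := by
      rw [PySem.List.slice_to_natCast]
      simp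
    have hlen : ((front.length : Int) + 1) = ((front ++ [x]).length : Int) := by
      simp [List.length_append]
    have happ : front ++ x :: xs = (front ++ [x]) ++ xs := by simp
    simp only [hslice]
    rw [happ, hlen, ih (front ++ [x])]
    by_cases hx : x ∈ front
    · simp [dupAux, hx, List.length_append]
    · simp [dupAux, hx, List.length_append]

-- the first pass's table: get? x is the (offset) index of x's first occurrence in l, unless x was already in d
theorem fs_get (l : List Int) :
    ∀ (d : PySem.Dict Int Int) (k x : Int),
    ((PySem.List.enumerate l k).foldl (fun d p => d.setdefault p.2 p.1) d).get? x
      = (d.get? x).or (if x ∈ l then some (k + (l.idxOf x : Int)) else none) := by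
  induction l with
  | nil => intro d k x; simp [PySem.List.enumerate_nil]
  | cons y ys ih =>
    intro d k x
    rw [PySem.List.enumerate_cons, List.foldl_cons, ih]
    by_cases hxy : x = y
    · subst hxy
      rw [PySem.Dict.get?_setdefault_self]
      cases hd : d.get? x with
      | none => simp [List.idxOf_cons_self]
      | some v => simp
    · rw [PySem.Dict.get?_setdefault_of_ne d (k, y).1 hxy]
      by_cases hmem : x ∈ ys
      · have : (y :: ys).idxOf x = ys.idxOf x + 1 := by
          simp [Ne.symm hxy]
        simp only [List.mem_cons, hxy, false_or, hmem, if_true, this]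
        have : k + 1 + (ys.idxOf x : Int) = k + ((ys.idxOf x : Int) + 1) := by ring
        rw [this]; push_cast; ring_nf
      · simp [List.mem_cons, hxy, hmem]

theorem idxOf_eq_of_not_mem_take (x : Int) : ∀ (l : List Int) (m : Nat),
    (hm : m < l.length) → l[m] = x → x ∉ l.take m → l.idxOf x = m := by
  intro l
  induction l with
  | nil => intro m hm; simp at hm
  | cons y ys ih =>
    intro m hm hx hnm
    cases m with
    | zero => simp at hx; subst hx; simp [List.idxOf_cons_self]
    | succ m' =>
      simp only [List.take_succ_cons, List.mem_cons, not_or] at hnm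
      have hne : x ≠ y := hnm.1
      have : (y :: ys).idxOf x = ys.idxOf x + 1 := by simp [Ne.symm hne]
      rw [this, ih m' (by simpa using hm) (by simpa using hx) hnm.2]

theorem idxOf_lt_of_mem_take (x : Int) : ∀ (l : List Int) (m : Nat),
    x ∈ l.take m → l.idxOf x < m := by
  intro l
  induction l with
  | nil => intro m h; simp at h
  | cons y ys ih =>
    intro m h
    cases m with
    | zero => simp at h
    | succ m' =>
      simp only [List.take_succ_cons, List.mem_cons] at h
      by_cases hxy : x = y
      · subst hxy; simp [List.idxOf_cons_self]
      · have : (y :: ys).idxOf x = ys.idxOf x + 1 := by simp [Ne.symm hxy]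
        rw [this]
        have := ih m' (h.resolve_left hxy)
        omega

-- B's stateless filter is pointwise the prefix-membership test, on every element of the enumeration
theorem altB_eq_prefix (l : List Int) :
    find_duplicate_indices_alt l = (PySem.List.enumerate l 0).filterMap
      (fun p => if p.2 ∈ PySem.List.slice l none (some p.1) then some p.1 else none) := by
  unfold find_duplicate_indices_alt
  refine List.filterMap_congr ?_
  intro p hp
  rw [PySem.List.mem_enumerate_iff] at hp
  obtain ⟨m, hm, rfl⟩ := hp
  have hmem : l[m] ∈ l := List.getElem_mem hm
  have hget := fs_get l PySem.Dict.empty 0 l[m]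
  rw [PySem.Dict.get?_empty, Option.none_or, if_pos hmem] at hget
  simp only [hget, zero_add]
  rw [PySem.List.slice_to_natCast]
  by_cases hx : l[m] ∈ l.take m
  · have h1 : l.idxOf l[m] < m := idxOf_lt_of_mem_take _ l m hx
    have : (l.idxOf l[m] : Int) ≠ (m : Int) := by exact_mod_cast Nat.ne_of_lt h1
    simp [hx, this]
  · have h1 : l.idxOf l[m] = m := idxOf_eq_of_not_mem_take _ l m hm rfl hx
    simp [hx, h1]

theorem find_eq (l : List Int) : find_duplicate_indices l = find_duplicate_indices_alt l := by
  unfold find_duplicate_indices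
  rw [findA_loop l PySem.Dict.empty [] [] 0 (by simp [PySem.Dict.contains_empty]), altB_eq_prefix]
  have := findB_loop l []
  simp only [List.length_nil, Nat.cast_zero, List.nil_append] at this
  rw [List.nil_append]
  exact this.symm

-- ===== VERDICT (by name: the statement is the Claim_ definition above) =====
theorem find_duplicate_indices_spec : Claim_equal_find_duplicate_indices := by
  intro list_ _
  unfold Spec_find_duplicate_indices
  exact find_eq list_
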